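-- pv_equiv track=rewrite | github.com/sleepy-creator/lesson_4 | python-4.py | rare_name
-- ===== SOURCE A (Python) =====
-- def rare_name(list2):
--     new_dict = {}
--     for name in list2:
--         for char in name:
--             if char.isupper():
--                 new_dict[char] = new_dict.get(char, 0) + 1
--             else: continue
--     new_dict = list(new_dict.items())
--     new_dict.sort(key=lambda x: x[1])
--     return new_dict[0][0]
-- ===== SOURCE B (Python) =====
-- def rare_name(list2):
--     text = "".join(list2)
--     best = None
--     for c in text:
--         if c.isupper():
--             n = text.count(c)
--             if best is None or n < best[1]:
--                 best = (c, n)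
--     return best[0]
-- ===== Notes on version B (the rewrite author's own statement) =====
-- stated objective: alternative
-- what changed: Replaces the counting dict and the sort of its items by a single running-argmin scan over the joined text, recomputing each letter's frequency with str.count and keeping the first strictly smaller one (no dict, no sort); on inputs with no uppercase letter both raise (A IndexError, B TypeError), excluded by Pre_.
import Mathlib
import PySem

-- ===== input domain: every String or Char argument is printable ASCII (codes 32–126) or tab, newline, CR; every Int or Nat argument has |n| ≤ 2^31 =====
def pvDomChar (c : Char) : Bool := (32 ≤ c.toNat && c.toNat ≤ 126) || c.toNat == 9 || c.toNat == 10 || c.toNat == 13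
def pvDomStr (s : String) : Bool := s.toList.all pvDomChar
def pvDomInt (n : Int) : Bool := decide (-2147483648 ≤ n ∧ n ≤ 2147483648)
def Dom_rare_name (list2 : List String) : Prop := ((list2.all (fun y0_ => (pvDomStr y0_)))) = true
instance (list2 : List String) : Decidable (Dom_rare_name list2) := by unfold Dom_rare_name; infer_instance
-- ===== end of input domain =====

-- B replaces A's counting dict + item sort by one running-argmin scan over the joined text,
-- recomputing each letter's frequency with str.count (objective: alternative, no dict, no sort).


-- ===== PORT A =====
def rare_name (list2 : List String) : String :=
  let new_dict : PySem.Dict Char Int :=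
    list2.foldl (fun d name =>
      name.toList.foldl (fun d char =>
        if PySem.Str.isupper char then d.modify char 0 (· + 1) else d) d)
      PySem.Dict.empty
  let pairs := PySem.List.sorted new_dict.items (fun x => x.2) false
  -- new_dict[0][0]: indexing the (nonempty by Pre_) sorted pair list; a Python char is a 1-char str
  (PySem.List.pyGetD pairs 0 ('A', 0)).1.toString

-- ===== PORT B =====
def rare_name_alt (list2 : List String) : String :=
  -- text = "".join(list2), kept as its character list
  let text : List Char := (list2.map String.toList).flatten
  -- one pass: keep the first (char, count) whose count is strictly smaller than the best so far
  let best := text.foldl (fun best c =>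
    if PySem.Str.isupper c then
      let n : Int := text.count c   -- text.count(c): exact for a single character
      match best with
      | none => some (c, n)
      | some m => if n < m.2 then some (c, n) else some m
    else best) (none : Option (Char × Int))
  match best with
  | some m => m.1.toString
  | none => ""   -- unreachable under Pre_ (Python raises TypeError on best[0] here)

-- ===== PRECONDITION & SPEC =====
-- Pre_ excludes exactly the inputs with no uppercase character, where both A and B raise (IndexError / TypeError).
def Pre_rare_name (list2 : List String) : Prop :=
  (list2.any (fun s => s.toList.any PySem.Str.isupper)) = true
instance (list2 : List String) : Decidable (Pre_rare_name list2) := by unfold Pre_rare_name; infer_instance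
def pvWitness_rare_name : List String := (["aBc", "dE"])
def Spec_rare_name (list2 : List String) (out : String) : Prop := out = rare_name_alt list2
instance (list2 : List String) (out : String) : Decidable (Spec_rare_name list2 out) := by unfold Spec_rare_name; infer_instance

-- ===== CLAIM (what is proved, stated in full; the proofs are below) =====
def Claim_equal_rare_name : Prop := ∀ (list2 : List String), Dom_rare_name list2 → Pre_rare_name list2 → Spec_rare_name list2 (rare_name list2)

-- ===== LEMMAS AND PROOFS =====

-- A's nested dict-building loop is Counter of the flattened uppercase letters.
theorem dict_eq_counter (list2 : List String) :
    list2.foldl (fun d name =>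
      name.toList.foldl (fun d char =>
        if PySem.Str.isupper char then d.modify char 0 (· + 1) else d) d)
      (PySem.Dict.empty : PySem.Dict Char Int)
    = PySem.Dict.counter (list2.flatMap (fun name => name.toList.filter PySem.Str.isupper)) := by
  rw [PySem.Dict.counter_eq_foldl]
  induction list2 using List.reverseRecOn with
  | nil => rfl
  | append_singleton l s ih =>
      simp only [List.foldl_append, List.flatMap_append, List.flatMap_cons, List.flatMap_nil,
        List.append_nil, List.foldl_cons, List.foldl_nil, ih, List.foldl_filter]

-- stable insertion commutes with mapping f when the key factors through f
theorem insertBy_map {α β κ : Type} [LT κ] [DecidableLT κ] (f : α → β) (k : β → κ)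
    (x : α) (ys : List α) :
    PySem.List.insertBy (fun a b => decide (k a < k b)) (f x) (ys.map f)
    = (PySem.List.insertBy (fun a b => decide (k (f a) < k (f b))) x ys).map f := by
  induction ys with
  | nil => rfl
  | cons y ys ih =>
      simp only [List.map_cons, PySem.List.insertBy]
      split_ifs with h
      · rfl
      · simp [ih]

theorem sorted_map {α β κ : Type} [LT κ] [DecidableLT κ] (f : α → β) (k : β → κ)
    (xs : List α) :
    PySem.List.sorted (xs.map f) k false
    = (PySem.List.sorted xs (fun a => k (f a)) false).map f := by
  rw [PySem.List.sorted_eq_foldl_insertBy, PySem.List.sorted_eq_foldl_insertBy]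
  suffices h : ∀ (acc : List α),
      List.foldl (fun acc x => PySem.List.insertBy (fun a b => decide (k a < k b)) x acc)
        (acc.map f) (xs.map f)
      = (List.foldl (fun acc x => PySem.List.insertBy (fun a b => decide (k (f a) < k (f b))) x acc)
          acc xs).map f by
    exact h []
  induction xs with
  | nil => intro acc; rfl
  | cons x xs ih =>
      intro acc
      simp only [List.map_cons, List.foldl_cons, insertBy_map f k x acc, ih]

-- the running-argmin step on bare characters (B's loop with the pair payload stripped)
def pvStep (k : Char → Int) (b : Option Char) (c : Char) : Option Char :=
  match b with
  | none => some c
  | some m => if k c < k m then some c else some m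

-- the head of a stable sort is the first element attaining the minimal key
theorem head_sorted_eq_argmin (k : Char → Int) (u : List Char) :
    (PySem.List.sorted u k false).head? = u.foldl (pvStep k) none := by
  induction u using List.reverseRecOn with
  | nil => rfl
  | append_singleton u x ih =>
      rw [PySem.List.sorted_eq_foldl_insertBy, List.foldl_append, List.foldl_append,
        ← PySem.List.sorted_eq_foldl_insertBy]
      rcases h : PySem.List.sorted u k false with _ | ⟨hd, t⟩
      · have hu : u = [] := (PySem.List.sorted_eq_nil_iff u k false).mp h
        subst hu
        rfl
      · have hu : List.foldl (pvStep k) none u = some hd := by rw [← ih, h]; rfl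
        rw [List.foldl_cons, List.foldl_nil, hu]
        by_cases hxy : k x < k hd
        · simp [PySem.List.insertBy, pvStep, hxy]
        · simp [PySem.List.insertBy, pvStep, hxy]

-- the argmin fold does not see repeated elements: folding over the dedup (set) is the same
theorem argmin_ofList (k : Char → Int) (l : List Char) :
    (PySem.Set.ofList l).foldl (pvStep k) none = l.foldl (pvStep k) none := by
  suffices h : ∀ (l : List Char) (seen : List Char) (s : Option Char),
      (∀ c ∈ seen, ∃ m, s = some m ∧ k m ≤ k c) →
      ∃ t, List.foldl PySem.Set.add seen l = seen ++ t ∧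
        List.foldl (pvStep k) s t = List.foldl (pvStep k) s l by
    obtain ⟨t, h1, h2⟩ := h l [] none (by simp)
    simp only [List.nil_append] at h1
    rw [PySem.Set.ofList, PySem.Set.empty, h1, h2]
  intro l
  induction l with
  | nil => intro seen s _; exact ⟨[], by simp, rfl⟩
  | cons c l ih =>
      intro seen s hinv
      by_cases hc : c ∈ seen
      · obtain ⟨m, hs, hm⟩ := hinv c hc
        have hstep : pvStep k s c = s := by
          rw [hs]; simp only [pvStep]
          rw [if_neg (by omega)]
        obtain ⟨t, h1, h2⟩ := ih seen s hinv
        refine ⟨t, ?_, ?_⟩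
        · have hadd : PySem.Set.add seen c = seen := by
            simp [PySem.Set.add, hc]
          rw [List.foldl_cons, hadd, h1]
        · rw [h2, List.foldl_cons, hstep]
      · have hinv' : ∀ d ∈ seen ++ [c], ∃ m, pvStep k s c = some m ∧ k m ≤ k d := by
          intro d hd
          rcases List.mem_append.mp hd with hd | hd
          · obtain ⟨m, hs, hm⟩ := hinv d hd
            rw [hs]; simp only [pvStep]
            split_ifs with h
            · exact ⟨c, rfl, le_trans (le_of_lt h) hm⟩
            · exact ⟨m, rfl, hm⟩
          · rw [List.mem_singleton] at hd; subst hd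
            cases s with
            | none => exact ⟨_, rfl, le_refl _⟩
            | some m =>
                simp only [pvStep]
                split_ifs with h
                · exact ⟨_, rfl, le_refl _⟩
                · exact ⟨m, rfl, by omega⟩
        obtain ⟨t, h1, h2⟩ := ih (seen ++ [c]) (pvStep k s c) hinv'
        refine ⟨c :: t, ?_, ?_⟩
        · have hadd : PySem.Set.add seen c = seen ++ [c] := by
            simp only [PySem.Set.add]
            rw [if_neg (by simpa [List.contains_iff_mem] using hc)]
          rw [List.foldl_cons, hadd, h1, List.append_assoc]
          rfl
        · rw [List.foldl_cons, List.foldl_cons, h2]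
  
-- the argmin fold only looks at keys of elements of the list (and of the start state)
theorem argmin_congr (k1 k2 : Char → Int) :
    ∀ (l : List Char) (s : Option Char), (∀ c ∈ l, k1 c = k2 c) →
    (∀ m, s = some m → k1 m = k2 m) →
    l.foldl (pvStep k1) s = l.foldl (pvStep k2) s := by
  intro l
  induction l with
  | nil => intro s _ _; rfl
  | cons c l ih =>
      intro s hl hs
      have hc := hl c List.mem_cons_self
      have hstep : pvStep k1 s c = pvStep k2 s c := by
        cases s with
        | none => rfl
        | some m => simp only [pvStep, hs m rfl, hc]
      rw [List.foldl_cons, List.foldl_cons, hstep]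
      refine ih _ (fun d hd => hl d (List.mem_cons_of_mem _ hd)) ?_
      intro m hm
      cases s with
      | none =>
          simp only [pvStep] at hm
          cases hm; exact hc
      | some m' =>
          simp only [pvStep] at hm
          split_ifs at hm <;> (cases hm)
          · exact hc
          · exact hs _ rfl
  
-- B's pair-carrying loop is the bare argmin fold with the (char, count) payload mapped on
theorem foldB_eq (text : List Char) :
    (∀ (l : List Char) (s : Option Char),
      l.foldl (fun best c =>
        if PySem.Str.isupper c then
          match best with
          | none => some (c, (text.count c : Int))
          | some m => if (text.count c : Int) < m.2 then some (c, (text.count c : Int)) else some m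
        else best) (s.map (fun c => (c, (text.count c : Int))))
      = ((l.filter PySem.Str.isupper).foldl (pvStep (fun c => (text.count c : Int))) s).map
          (fun c => (c, (text.count c : Int)))) := by
  intro l
  induction l with
  | nil => intro s; rfl
  | cons c l ih =>
      intro s
      by_cases hc : PySem.Str.isupper c
      · rw [List.foldl_cons, List.filter_cons_of_pos hc, List.foldl_cons]
        have hstep : (if PySem.Str.isupper c then
            match s.map (fun c => (c, (text.count c : Int))) with
            | none => some (c, (text.count c : Int))
            | some m => if (text.count c : Int) < m.2 then some (c, (text.count c : Int)) else some m
          else s.map (fun c => (c, (text.count c : Int))))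
          = (pvStep (fun c => (text.count c : Int)) s c).map (fun c => (c, (text.count c : Int))) := by
          rw [if_pos hc]
          cases s with
          | none => rfl
          | some m =>
              simp only [Option.map_some, pvStep]
              split_ifs <;> rfl
        rw [hstep, ih]
      · rw [List.foldl_cons, List.filter_cons_of_neg hc, if_neg hc, ih]

-- the argmin fold of a nonempty list returns a value
theorem argmin_isSome (k : Char → Int) :
    ∀ (l : List Char) (m : Char), ∃ m', l.foldl (pvStep k) (some m) = some m' := by
  intro l
  induction l with
  | nil => exact fun m => ⟨m, rfl⟩
  | cons c l ih =>
      intro m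
      rw [List.foldl_cons]
      simp only [pvStep]
      split_ifs <;> exact ih _

-- the flattened uppercase letters are the uppercase filter of the joined text
theorem letters_eq_filter (list2 : List String) :
    list2.flatMap (fun name => name.toList.filter PySem.Str.isupper)
    = ((list2.map String.toList).flatten).filter PySem.Str.isupper := by
  rw [List.filter_flatten, List.map_map, List.flatMap_def]
  rfl

-- ===== VERDICT (by name: the statement is the Claim_ definition above) =====
theorem rare_name_spec : Claim_equal_rare_name := by
  intro list2 _ hpre
  unfold Spec_rare_name rare_name rare_name_alt
  rw [dict_eq_counter]
  dsimp only
  rw [letters_eq_filter]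
  set text := (list2.map String.toList).flatten with htext
  set letters := text.filter PySem.Str.isupper with hl
  set kL : Char → Int := fun c => (letters.count c : Int) with hkL
  set kT : Char → Int := fun c => (text.count c : Int) with hkT
  -- the two keys agree on letters (counting in the filtered list = counting in text)
  have hkey : ∀ c ∈ letters, kT c = kL c := by
    intro c hc
    have hup : PySem.Str.isupper c = true := (List.mem_filter.mp hc).2
    rw [hkT, hkL, hl]
    simp [List.count_filter hup]
  -- letters is nonempty under Pre_
  have hne : letters ≠ [] := by
    intro h
    unfold Pre_rare_name at hpre
    rw [List.any_eq_true] at hpre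
    obtain ⟨s, hs, hu⟩ := hpre
    rw [List.any_eq_true] at hu
    obtain ⟨c, hc, hcu⟩ := hu
    have : c ∈ letters := by
      rw [hl, htext, List.mem_filter, List.mem_flatten]
      exact ⟨⟨s.toList, List.mem_map.mpr ⟨s, hs, rfl⟩, hc⟩, hcu⟩
    simp [h] at this
  -- the common argmin value
  obtain ⟨c, cs, hlc⟩ := List.exists_cons_of_ne_nil hne
  have hsome : ∃ m, letters.foldl (pvStep kL) none = some m := by
    rw [hlc, List.foldl_cons]
    exact argmin_isSome kL cs c
  obtain ⟨m, hm⟩ := hsome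
  -- A's side: sorted items of the counter, head, first component
  rw [PySem.Dict.items_counter,
    sorted_map (fun c => (c, (letters.count c : Int))) (fun x => x.2)]
  have hk2 : (fun a : Char => ((a, (letters.count a : Int)).2)) = kL := rfl
  rw [hk2]
  have hA : (PySem.List.sorted (PySem.Set.ofList letters) kL false).head? = some m := by
    rw [head_sorted_eq_argmin, argmin_ofList, hm]
  -- B's side: the pair fold is the argmin fold with payload
  have hB := foldB_eq text text none
  rw [Option.map_none] at hB
  rw [← hl] at hB
  rw [argmin_congr kT kL letters none hkey (by intro m h; cases h), hm] at hB
  -- finish: both return m.toString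
  rcases hs : PySem.List.sorted (PySem.Set.ofList letters) kL false with _ | ⟨hd, t⟩
  · rw [hs] at hA; cases hA
  · rw [hs] at hA
    simp only [List.head?] at hA
    cases hA
    rw [hB]
    simp [PySem.List.pyGetD, PySem.List.pyGet?, PySem.List.pyIdx?]
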